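-- pv_equiv track=rewrite | github.com/randomnumber53/muddSeniorThesis | code/density.py | transform
-- ===== SOURCE A (Python) =====
-- tommyTransform2 =  [[1,1,1,1],      # 0 -> 0 + 1 + 2 + 3
--                    [1,1,-1,-1],     # 1 -> 0 + 1 - 2 - 3
--                    [1,-1,-1,1],     # 2 -> 0 - 1 - 2 + 3
--                    [1,-1,1,-1]]     # 3 -> 0 - 1 + 2 - 3
--
-- def transform(hyp):
--
--     oneKetTrans = tommyTransform2  # tells me how each single-particle ket transforms
--
--     sumVec = [0] * 16
--
--     # go through all the two-particles kets in hyp...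
--     for i in range(len(hyp)):
--         if hyp[i] == 0: continue
--         left = (int) (i/4)  # state of the left particle
--         right = i % 4  # state of the right particle
--
--         # transform the kets, and take their product
--         prod = tensorProd(oneKetTrans[left],oneKetTrans[right])
--
--         # add this to our final state
--         for j in range(len(sumVec)):
--             sumVec[j] += hyp[i] * prod[j]
--
--     return sumVec
--
-- def tensorProd(left,right):
--     ''' takes 2 single-particle states (BOTH vectors of len d) <-- pls don't fight me on this
--         returns their product (vector of len d^2)
--         ex: left:  |0> - |1> = [1,-1,0]
--             right: |2>       = [0,0,1]
--             out:   |02> - |12> = [0,0,1,0,0,-1,0,0,0]  '''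
--     d = len(left)
--     prod = []
--
--     for i in range(d):
--         for j in range(d):
--             prod.append(left[i]*right[j])
--
--     return prod
-- ===== SOURCE B (Python) =====
-- _T = [[1, 1, 1, 1],
--       [1, 1, -1, -1],
--       [1, -1, -1, 1],
--       [1, -1, 1, -1]]
--
-- def transform(hyp):
--     # Factorized (fast) Kronecker transform: pad the state to 16, apply the 4x4
--     # ket transform along the right particle index, then along the left one,
--     # instead of accumulating one 16x16 tensor product per nonzero ket.
--     v = [hyp[i] if i < len(hyp) else 0 for i in range(16)]
--     mid = [sum(v[4 * l + r] * _T[r][b] for r in range(4))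
--            for l in range(4) for b in range(4)]
--     return [sum(mid[4 * l + b] * _T[l][a] for l in range(4))
--             for a in range(4) for b in range(4)]
-- ===== Notes on version B (the rewrite author's own statement) =====
-- stated objective: alternative
-- what changed: B replaces A's per-nonzero-ket 16x16 tensor-product accumulation by the factorized fast Kronecker transform: it pads the state to 16 entries and applies the 4x4 ket transform in two staged passes, once along the right particle index and once along the left (128 multiplications instead of up to 256).
import Mathlib
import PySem

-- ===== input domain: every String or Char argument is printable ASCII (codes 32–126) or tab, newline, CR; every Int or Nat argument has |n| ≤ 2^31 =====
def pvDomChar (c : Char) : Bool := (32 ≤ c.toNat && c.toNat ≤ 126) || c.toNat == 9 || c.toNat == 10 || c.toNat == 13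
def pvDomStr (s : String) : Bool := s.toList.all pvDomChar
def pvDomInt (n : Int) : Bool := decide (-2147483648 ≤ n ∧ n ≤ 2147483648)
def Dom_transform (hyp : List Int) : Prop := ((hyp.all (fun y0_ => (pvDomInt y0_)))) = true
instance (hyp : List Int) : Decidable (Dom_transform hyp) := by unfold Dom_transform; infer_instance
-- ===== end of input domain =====

-- B replaces the per-nonzero-ket tensor-product accumulation by the factorized fast
-- Kronecker transform: two staged 4x4 passes, right index then left (alternative).

-- ===== PORT A =====
def tommyTransform2 : List (List Int) :=
  [[1, 1, 1, 1], [1, 1, -1, -1], [1, -1, -1, 1], [1, -1, 1, -1]]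

def tensorProd (left right : List Int) : List Int :=
  (List.range left.length).foldl (fun prod i =>
    (List.range right.length).foldl (fun prod j =>
      prod ++ [left.getD i 0 * right.getD j 0]) prod) []

-- (int)(i/4) truncates the float i/4, which equals Nat division i/4 here
def transform (hyp : List Int) : List Int :=
  (List.range hyp.length).foldl (fun sumVec i =>
    if hyp.getD i 0 = 0 then sumVec
    else
      let prod := tensorProd (tommyTransform2.getD (i / 4) []) (tommyTransform2.getD (i % 4) [])
      sumVec.mapIdx (fun j s => s + hyp.getD i 0 * prod.getD j 0))
  (List.replicate 16 0)

-- ===== PORT B =====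
def bT : List (List Int) :=
  [[1, 1, 1, 1], [1, 1, -1, -1], [1, -1, -1, 1], [1, -1, 1, -1]]

-- `hyp[i] if i < len(hyp) else 0` is exactly `hyp.getD i 0`
def transform_alt (hyp : List Int) : List Int :=
  let v := (List.range 16).map (fun i => hyp.getD i 0)
  let mid := (List.range 4).flatMap (fun l => (List.range 4).map (fun b =>
    ((List.range 4).map (fun r => v.getD (4 * l + r) 0 * (bT.getD r []).getD b 0)).sum))
  (List.range 4).flatMap (fun a => (List.range 4).map (fun b =>
    ((List.range 4).map (fun l => mid.getD (4 * l + b) 0 * (bT.getD l []).getD a 0)).sum))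

-- ===== PRECONDITION & SPEC =====
-- Pre_ excludes exactly the inputs where A raises IndexError: a nonzero entry at an index
-- ≥ 16 (oneKetTrans[left] with left ≥ 4).
def Pre_transform (hyp : List Int) : Prop := ∀ x ∈ hyp.drop 16, x = 0
instance (hyp : List Int) : Decidable (Pre_transform hyp) := by unfold Pre_transform; infer_instance

def pvWitness_transform : List Int := [1, 0, -2, 3]

def Spec_transform (hyp : List Int) (out : List Int) : Prop := out = transform_alt hyp
instance (hyp : List Int) (out : List Int) : Decidable (Spec_transform hyp out) := by unfold Spec_transform; infer_instance

-- ===== CLAIM (what is proved, stated in full; the proofs are below) =====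
def Claim_equal_transform : Prop := ∀ (hyp : List Int), Dom_transform hyp → Pre_transform hyp → Spec_transform hyp (transform hyp)

-- ===== LEMMAS AND PROOFS =====

-- column i of A's transform: the tensor product A builds for ket i
def coefA (j i : Nat) : Int :=
  (tensorProd (tommyTransform2.getD (i / 4) []) (tommyTransform2.getD (i % 4) [])).getD j 0

lemma mapIdx_map_range (n : Nat) (f : Nat → Int) (g : Nat → Int → Int) :
    ((List.range n).map f).mapIdx (fun j s => g j s) = (List.range n).map (fun j => g j (f j)) := by
  apply List.ext_getElem
  · simp
  · intro k h1 h2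
    simp

lemma A_loop (hyp : List Int) (n : Nat) :
    (List.range n).foldl (fun sumVec i =>
      if hyp.getD i 0 = 0 then sumVec
      else
        let prod := tensorProd (tommyTransform2.getD (i / 4) []) (tommyTransform2.getD (i % 4) [])
        sumVec.mapIdx (fun j s => s + hyp.getD i 0 * prod.getD j 0))
      (List.replicate 16 0)
    = (List.range 16).map (fun j =>
        ∑ i ∈ Finset.range n, (if hyp.getD i 0 = 0 then 0 else hyp.getD i 0 * coefA j i)) := by
  induction n with
  | zero =>
    apply List.ext_getElem
    · simp
    · intro k h1 h2; simp
  | succ m ih =>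
    rw [List.range_succ, List.foldl_append, ih, List.foldl_cons, List.foldl_nil]
    by_cases hm : hyp.getD m 0 = 0
    · simp only [hm]
      apply List.map_congr_left
      intro j _
      rw [Finset.sum_range_succ, if_pos hm, add_zero]
    · simp only [hm]
      rw [mapIdx_map_range]
      apply List.map_congr_left
      intro j _
      rw [Finset.sum_range_succ, if_neg hm]
      rfl

lemma pre_zero_ge16 (hyp : List Int) (hpre : Pre_transform hyp) :
    ∀ i, 16 ≤ i → hyp.getD i 0 = 0 := by
  intro i hi
  by_cases hlen : i < hyp.length
  · have hidx : i = 16 + (i - 16) := by omega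
    rw [List.getD_eq_getElem?_getD, hidx, ← List.getElem?_drop]
    rcases h : (hyp.drop 16)[i - 16]? with _ | x
    · simp
    · have hx := hpre x (List.mem_of_getElem? h)
      simp [hx]
  · exact List.getD_eq_default _ _ (by omega)

lemma sum_to_16 (hyp : List Int) (hpre : Pre_transform hyp) (j : Nat) :
    ∑ i ∈ Finset.range hyp.length, (if hyp.getD i 0 = 0 then 0 else hyp.getD i 0 * coefA j i)
    = ∑ i ∈ Finset.range 16, hyp.getD i 0 * coefA j i := by
  have hterm : ∀ i, (if hyp.getD i 0 = 0 then (0 : Int) else hyp.getD i 0 * coefA j i)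
      = hyp.getD i 0 * coefA j i := by
    intro i
    by_cases h : hyp.getD i 0 = 0
    · rw [if_pos h, h, zero_mul]
    · rw [if_neg h]
  simp only [hterm]
  rcases Nat.lt_or_ge 16 hyp.length with h | h
  · refine (Finset.sum_subset ((by intro x hx; simp only [Finset.mem_range] at *; omega : _ ⊆ _)) (fun i hi hni => ?_)).symm
    have hz : hyp.getD i 0 = 0 := pre_zero_ge16 hyp hpre i (by simp at hni; omega)
    rw [List.getD_eq_getElem?_getD] at hz
    simp [hz]
  · refine Finset.sum_subset ((by intro x hx; simp only [Finset.mem_range] at *; omega : _ ⊆ _)) (fun i hi hni => ?_)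
    have hz : hyp.getD i 0 = 0 :=
      List.getD_eq_default _ _ (by simp at hni; omega)
    rw [List.getD_eq_getElem?_getD] at hz
    simp [hz]

lemma B_val (hyp : List Int) :
    transform_alt hyp
    = (List.range 16).map (fun j => ∑ i ∈ Finset.range 16, hyp.getD i 0 * coefA j i) := by
  simp [transform_alt, bT, coefA, tensorProd, tommyTransform2, List.range_succ,
    Finset.sum_range_succ, List.getD]
  ring_nf
  trivial

-- ===== VERDICT (by name: the statement is the Claim_ definition above) =====
theorem transform_spec : Claim_equal_transform := by
  intro hyp _ hpre
  unfold Spec_transform transform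
  rw [A_loop, B_val]
  apply List.map_congr_left
  intro j _
  exact sum_to_16 hyp hpre j
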